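-- pv_equiv track=rewrite | github.com/RamyShete/University | ga_hs.py | check_one_subject_in_day
-- ===== SOURCE A (Python) =====
-- def check_one_subject_in_day(b_id, b_list, t_list): # Отсутствие одного и того же предмета у одного класса в один день
--     numOfConflict = 0
--     check_list = []
--
--     for i in range(len(b_list)):
--         if b_list[i] == b_id:
--             check_list.append([b_list[i], t_list[i]])
--
--     for i in range(len(check_list)):
--         for j in range(len(check_list)):
--             if i == j:
--                 numOfConflict += 0
--             else:
--                 if check_list[i][1] // 100 == check_list[j][1] // 100:
--                     numOfConflict += 1
--     return numOfConflict
-- ===== SOURCE B (Python) =====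
-- def check_one_subject_in_day(b_id, b_list, t_list):
--     numOfConflict = 0
--     seen = {}
--     for b, t in zip(b_list, t_list):
--         if b == b_id:
--             d = t // 100
--             c = seen.get(d, 0)
--             numOfConflict += 2 * c
--             seen[d] = c + 1
--     return numOfConflict
-- ===== Notes on version B (the rewrite author's own statement) =====
-- stated objective: alternative
-- what changed: Replaced the quadratic double loop over the filtered (class, time) list by a single pass over zip(b_list, t_list) that keeps a per-day counter dict and adds 2*count for each repeated day.
import Mathlib
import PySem

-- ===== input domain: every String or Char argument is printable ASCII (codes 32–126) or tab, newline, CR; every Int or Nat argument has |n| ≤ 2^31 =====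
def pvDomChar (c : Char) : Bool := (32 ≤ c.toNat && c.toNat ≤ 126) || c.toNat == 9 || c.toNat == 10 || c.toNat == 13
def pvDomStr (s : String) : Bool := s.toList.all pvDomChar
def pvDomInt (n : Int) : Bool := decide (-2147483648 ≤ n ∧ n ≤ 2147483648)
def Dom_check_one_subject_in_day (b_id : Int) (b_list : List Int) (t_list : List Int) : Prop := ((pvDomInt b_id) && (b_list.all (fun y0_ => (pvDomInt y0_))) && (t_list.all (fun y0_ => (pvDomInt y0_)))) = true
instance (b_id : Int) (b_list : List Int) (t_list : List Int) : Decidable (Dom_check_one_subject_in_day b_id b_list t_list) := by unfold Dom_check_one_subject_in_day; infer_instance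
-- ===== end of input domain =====

-- ===== PORT A =====
-- B replaces A's quadratic double loop by one pass with a per-day counter (see claim).
def check_one_subject_in_day (b_id : Int) (b_list : List Int) (t_list : List Int) : Int :=
  let check_list : List (Int × Int) :=
    (List.range b_list.length).foldl (fun acc i =>
      if b_list.getD i 0 == b_id then acc ++ [(b_list.getD i 0, t_list.getD i 0)] else acc) []
  (List.range check_list.length).foldl (fun n i =>
    (List.range check_list.length).foldl (fun n j =>
      if i == j then n + 0
      else if PySem.Int.floordiv (check_list.getD i (0, 0)).2 100 ==
              PySem.Int.floordiv (check_list.getD j (0, 0)).2 100 then n + 1 else n) n) 0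

-- ===== PORT B =====
def check_one_subject_in_day_alt (b_id : Int) (b_list : List Int) (t_list : List Int) : Int :=
  ((b_list.zip t_list).foldl (fun (st : Int × PySem.Dict Int Int) p =>
    if p.1 == b_id then
      let d := PySem.Int.floordiv p.2 100
      let c := st.2.getD d 0
      (st.1 + 2 * c, st.2.insert d (c + 1))
    else st) (0, PySem.Dict.empty)).1

-- ===== PRECONDITION & SPEC =====
-- Pre_ excludes exactly the inputs where A raises IndexError: a matching class id at an index beyond t_list.
def Pre_check_one_subject_in_day (b_id : Int) (b_list : List Int) (t_list : List Int) : Prop :=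
  ∀ i < b_list.length, t_list.length ≤ i → b_list.getD i 0 ≠ b_id
instance (b_id : Int) (b_list : List Int) (t_list : List Int) : Decidable (Pre_check_one_subject_in_day b_id b_list t_list) := by unfold Pre_check_one_subject_in_day; infer_instance
def pvWitness_check_one_subject_in_day : Int × List Int × List Int := (1, [1, 2, 1], [101, 205, 108])
def Spec_check_one_subject_in_day (b_id : Int) (b_list : List Int) (t_list : List Int) (out : Int) : Prop := out = check_one_subject_in_day_alt b_id b_list t_list
instance (b_id : Int) (b_list : List Int) (t_list : List Int) (out : Int) : Decidable (Spec_check_one_subject_in_day b_id b_list t_list out) := by unfold Spec_check_one_subject_in_day; infer_instance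

-- ===== CLAIM =====
def Claim_equal_check_one_subject_in_day : Prop := ∀ (b_id : Int) (b_list : List Int) (t_list : List Int), Dom_check_one_subject_in_day b_id b_list t_list → Pre_check_one_subject_in_day b_id b_list t_list → Spec_check_one_subject_in_day b_id b_list t_list (check_one_subject_in_day b_id b_list t_list)

-- ===== LEMMAS AND PROOFS =====

-- day of a (class, time) row
def pvDay (p : Int × Int) : Int := PySem.Int.floordiv p.2 100

-- indicator weight of an ordered index pair in A's double loop, over the day list
def pvW (ds : List Int) (i j : Nat) : Int :=
  if i = j then 0 else if ds.getD i 0 = ds.getD j 0 then 1 else 0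

-- A's double loop as a sum over the day list
def pvA2 (ds : List Int) : Int :=
  ((List.range ds.length).map (fun i => ((List.range ds.length).map (pvW ds i)).sum)).sum

-- incremental pair count: processing ds after having seen prev
def pvPC (prev ds : List Int) : Int :=
  match ds with
  | [] => 0
  | d :: rest => 2 * (prev.count d : Int) + pvPC (prev ++ [d]) rest

-- B's fold step over the day list
def pvStep (st : Int × PySem.Dict Int Int) (d : Int) : Int × PySem.Dict Int Int :=
  (st.1 + 2 * st.2.getD d 0, st.2.insert d (st.2.getD d 0 + 1))

theorem pvSum_range_succ (n : Nat) (f : Nat → Int) :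
    ((List.range (n + 1)).map f).sum = ((List.range n).map f).sum + f n := by
  rw [List.range_succ]; simp

theorem pvSum_indicator (ds : List Int) (d : Int) :
    ((List.range ds.length).map (fun j => if ds.getD j 0 = d then (1 : Int) else 0)).sum
      = (ds.count d : Int) := by
  induction ds with
  | nil => simp
  | cons x rest ih =>
    simp only [List.length_cons, List.range_succ_eq_map, List.map_cons, List.map_map,
      List.sum_cons, List.getD_cons_zero, List.count_cons]
    have hm : ((List.range rest.length).map
        ((fun j => if (x :: rest).getD j 0 = d then (1 : Int) else 0) ∘ Nat.succ)).sum
        = (rest.count d : Int) := by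
      rw [← ih]
      rfl
    rw [hm]
    by_cases h : x = d
    · simp [h]
      omega
    · simp [h]

theorem pvGetD_concat (ds : List Int) (e : Int) :
    (ds ++ [e]).getD ds.length 0 = e := by
  rw [List.getD_eq_getElem?_getD, List.getElem?_append_right le_rfl]
  simp

theorem pvA2_snoc (ds : List Int) (e : Int) :
    pvA2 (ds ++ [e]) = pvA2 ds + 2 * (ds.count e : Int) := by
  have hget : ∀ i < ds.length, (ds ++ [e]).getD i 0 = ds.getD i 0 := by
    intro i hi
    rw [List.getD_eq_getElem?_getD, List.getD_eq_getElem?_getD, List.getElem?_append_left hi]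
  have hinner : ∀ i < ds.length,
      ((List.range (ds.length + 1)).map (pvW (ds ++ [e]) i)).sum
        = ((List.range ds.length).map (pvW ds i)).sum
          + (if ds.getD i 0 = e then (1 : Int) else 0) := by
    intro i hi
    rw [pvSum_range_succ]
    congr 1
    · congr 1; apply List.map_congr_left; intro j hj
      rw [List.mem_range] at hj
      simp only [pvW, hget i hi, hget j hj]
    · simp only [pvW]
      rw [if_neg (by omega), hget i hi, pvGetD_concat]
  have hlast : ((List.range (ds.length + 1)).map (pvW (ds ++ [e]) ds.length)).sum
      = (ds.count e : Int) := by
    rw [pvSum_range_succ]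
    have h1 : ((List.range ds.length).map (pvW (ds ++ [e]) ds.length)).sum
        = ((List.range ds.length).map (fun j => if ds.getD j 0 = e then (1 : Int) else 0)).sum := by
      congr 1; apply List.map_congr_left; intro j hj
      rw [List.mem_range] at hj
      simp only [pvW]
      rw [if_neg (by omega), hget j hj, pvGetD_concat]
      by_cases h : ds.getD j 0 = e
      · rw [if_pos h.symm, if_pos h]
      · rw [if_neg (fun he => h he.symm), if_neg h]
    rw [h1, pvSum_indicator]
    simp [pvW]
  unfold pvA2
  have hlen : (ds ++ [e]).length = ds.length + 1 := by simp
  rw [hlen]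
  rw [pvSum_range_succ ds.length (fun i => ((List.range (ds.length + 1)).map (pvW (ds ++ [e]) i)).sum)]
  rw [hlast]
  have hmid : ((List.range ds.length).map
      (fun i => ((List.range (ds.length + 1)).map (pvW (ds ++ [e]) i)).sum)).sum
      = ((List.range ds.length).map (fun i => ((List.range ds.length).map (pvW ds i)).sum)).sum
        + ((List.range ds.length).map (fun i => if ds.getD i 0 = e then (1 : Int) else 0)).sum := by
    rw [← PySem.List.sum_map_add_int]
    congr 1; apply List.map_congr_left; intro i hi
    rw [List.mem_range] at hi
    exact hinner i hi
  rw [hmid, pvSum_indicator]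
  ring

theorem pvA2_eq_pvPC (ds : List Int) : ∀ prev, pvA2 (prev ++ ds) = pvA2 prev + pvPC prev ds := by
  induction ds with
  | nil => intro prev; simp [pvPC]
  | cons d rest ih =>
    intro prev
    have h : prev ++ d :: rest = (prev ++ [d]) ++ rest := by simp
    rw [h, ih, pvA2_snoc]
    simp [pvPC]; ring

theorem pvBfold (ds : List Int) : ∀ (prev : List Int) (acc : Int) (dct : PySem.Dict Int Int),
    (∀ d, dct.getD d 0 = (prev.count d : Int)) →
    (ds.foldl pvStep (acc, dct)).1 = acc + pvPC prev ds := by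
  induction ds with
  | nil => intro prev acc dct _; simp [pvPC]
  | cons d rest ih =>
    intro prev acc dct h
    simp only [List.foldl_cons, pvStep]
    rw [ih (prev ++ [d])]
    · rw [h d]; simp [pvPC]; ring
    · intro d'
      rw [PySem.Dict.getD_insert]
      by_cases hd : d' = d
      · subst hd; rw [if_pos rfl, h d']; simp [List.count_append]
      · have hd2 : ¬d = d' := fun he => hd he.symm
        rw [if_neg hd, h d']
        simp [List.count_append, hd2]

theorem pvGetD_map_day (l : List (Int × Int)) (i : Nat) :
    (l.map pvDay).getD i 0 = pvDay (l.getD i (0, 0)) := by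
  rw [List.getD_eq_getElem?_getD, List.getD_eq_getElem?_getD, List.getElem?_map]
  cases l[i]? with
  | none => simp [pvDay, PySem.Int.floordiv]
  | some p => simp

-- A's second (double) loop equals pvA2 on the day list of check_list
theorem pvDouble_eq_A2 (cl : List (Int × Int)) :
    (List.range cl.length).foldl (fun n i =>
      (List.range cl.length).foldl (fun n j =>
        if i == j then n + 0
        else if PySem.Int.floordiv (cl.getD i (0, 0)).2 100 ==
                PySem.Int.floordiv (cl.getD j (0, 0)).2 100 then n + 1 else n) n) 0
      = pvA2 (cl.map pvDay) := by
  have hinner : ∀ (i : Nat) (n : Int),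
      (List.range cl.length).foldl (fun n j =>
        if i == j then n + 0
        else if PySem.Int.floordiv (cl.getD i (0, 0)).2 100 ==
                PySem.Int.floordiv (cl.getD j (0, 0)).2 100 then n + 1 else n) n
        = n + ((List.range cl.length).map (pvW (cl.map pvDay) i)).sum := by
    intro i n
    have hfun : (fun (n : Int) (j : Nat) =>
        if i == j then n + 0
        else if PySem.Int.floordiv (cl.getD i (0, 0)).2 100 ==
                PySem.Int.floordiv (cl.getD j (0, 0)).2 100 then n + 1 else n)
        = fun (n : Int) (j : Nat) => n + pvW (cl.map pvDay) i j := by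
      funext n j
      simp only [pvW, pvGetD_map_day, pvDay, beq_iff_eq]
      split_ifs <;> ring
    rw [hfun, PySem.List.foldl_add]
  have houter : (fun (n : Int) (i : Nat) =>
      (List.range cl.length).foldl (fun n j =>
        if i == j then n + 0
        else if PySem.Int.floordiv (cl.getD i (0, 0)).2 100 ==
                PySem.Int.floordiv (cl.getD j (0, 0)).2 100 then n + 1 else n) n)
      = fun (n : Int) (i : Nat) => n + ((List.range cl.length).map (pvW (cl.map pvDay) i)).sum := by
    funext n i; exact hinner i n
  rw [houter, PySem.List.foldl_add]
  simp [pvA2]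

-- under Pre_, A's filtered index traversal builds exactly the zip-filter B traverses
theorem pvCheckList_eq (b_id : Int) : ∀ (bs ts : List Int),
    (∀ i < bs.length, ts.length ≤ i → bs.getD i 0 ≠ b_id) →
    ((List.range bs.length).filter (fun i => bs.getD i 0 == b_id)).map
        (fun i => (bs.getD i 0, ts.getD i 0))
      = (bs.zip ts).filter (fun p => p.1 == b_id) := by
  intro bs
  induction bs with
  | nil => intro ts _; simp
  | cons b bs' ih =>
    intro ts hpre
    have hpred : ((fun i => (b :: bs').getD i 0 == b_id) ∘ Nat.succ)
        = (fun i => bs'.getD i 0 == b_id) := by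
      funext j; simp [Function.comp, Nat.succ_eq_add_one]
    have hshape : ((List.range (b :: bs').length).filter
          (fun i => (b :: bs').getD i 0 == b_id)).map
          (fun i => ((b :: bs').getD i 0, ts.getD i 0))
        = (if b == b_id then [(b, ts.getD 0 0)] else [])
          ++ ((List.range bs'.length).filter (fun i => bs'.getD i 0 == b_id)).map
              (fun i => (bs'.getD i 0, ts.getD (i + 1) 0)) := by
      rw [List.length_cons, List.range_succ_eq_map, List.filter_cons]
      simp only [List.getD_cons_zero, List.filter_map, hpred]
      by_cases hb : (b == b_id) <;> simp [hb]
    rw [hshape]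
    cases ts with
    | nil =>
      have hb : ¬(b == b_id) := by
        simpa using hpre 0 (by simp) (by simp)
      have hnil : ((List.range bs'.length).filter (fun i => bs'.getD i 0 == b_id)) = [] := by
        rw [List.filter_eq_nil_iff]
        intro j hj
        rw [List.mem_range] at hj
        simpa using hpre (j + 1) (by simpa using Nat.succ_lt_succ hj) (by simp)
      rw [if_neg hb, hnil]
      simp
    | cons t ts' =>
      have htail := ih ts' (by
        intro i hi hle
        simpa [List.getD_cons_succ] using hpre (i + 1) (by simpa using Nat.succ_lt_succ hi)
          (by simpa using Nat.succ_le_succ hle))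
      simp only [List.zip_cons_cons, List.filter_cons, List.getD_cons_zero, List.getD_cons_succ]
      rw [← htail]
      by_cases hb : (b == b_id) <;> simp [hb]

theorem pvDictEmpty_count (d : Int) :
    (PySem.Dict.empty : PySem.Dict Int Int).getD d 0 = ((List.count d ([] : List Int) : Nat) : Int) := by
  simp

-- ===== VERDICT =====
theorem check_one_subject_in_day_spec : Claim_equal_check_one_subject_in_day := by
  intro b_id b_list t_list _ hpre
  unfold Spec_check_one_subject_in_day check_one_subject_in_day check_one_subject_in_day_alt
  rw [PySem.List.foldl_append_if, List.nil_append]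
  rw [pvDouble_eq_A2, pvCheckList_eq b_id b_list t_list hpre]
  set matched := (b_list.zip t_list).filter (fun p => p.1 == b_id) with hm
  have hB : ((b_list.zip t_list).foldl (fun (st : Int × PySem.Dict Int Int) p =>
      if p.1 == b_id then
        (st.1 + 2 * st.2.getD (PySem.Int.floordiv p.2 100) 0,
         st.2.insert (PySem.Int.floordiv p.2 100)
           (st.2.getD (PySem.Int.floordiv p.2 100) 0 + 1))
      else st) (0, PySem.Dict.empty)).1
      = ((matched.map pvDay).foldl pvStep ((0 : Int), (PySem.Dict.empty : PySem.Dict Int Int))).1 := by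
    rw [PySem.List.foldl_if_eq_foldl_filter, ← hm, List.foldl_map]
    rfl
  rw [hB, pvBfold (matched.map pvDay) [] 0 PySem.Dict.empty pvDictEmpty_count]
  have h0 : pvA2 [] = 0 := by simp [pvA2]
  have := pvA2_eq_pvPC (matched.map pvDay) []
  simp only [List.nil_append, h0, zero_add] at this ⊢
  exact this
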